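-- pv_equiv track=rewrite | github.com/birc-gsa-2022/bwt-python-elvirazetterberg | src/bwt.py | bucket_first
-- ===== SOURCE A (Python) =====
-- def bucket_first(first: list) -> dict:
--     '''
--     >>> count_to_bucket([$,i,i,i,i,m,p,p,s,s])
--     bucket = {$ : 0, i : 1, m : 5, p : 6, s : 8}
--     '''
--     C = {}
--     for i,c in enumerate(first):
--         if c in C:
--             continue
--         else:
--             C[c] = i
--
--     return C
-- ===== SOURCE B (Python) =====
-- def bucket_first(first: list) -> dict:
--     # one reverse pass: each later index is overwritten by an earlier one,
--     # so idx ends up mapping every symbol to its first-occurrence index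
--     idx = {}
--     for i, c in reversed(list(enumerate(first))):
--         idx[c] = i
--     # emit the keys in first-occurrence order
--     return {c: idx[c] for c in dict.fromkeys(first)}
-- ===== Notes on version B (the rewrite author's own statement) =====
-- stated objective: alternative
-- what changed: A's single forward loop guarded by an if/continue membership check is replaced by an unconditional reverse-overwrite pass (later indices overwritten by earlier ones) plus a dict comprehension over dict.fromkeys(first) that re-emits the keys in first-occurrence order.
import Mathlib
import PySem

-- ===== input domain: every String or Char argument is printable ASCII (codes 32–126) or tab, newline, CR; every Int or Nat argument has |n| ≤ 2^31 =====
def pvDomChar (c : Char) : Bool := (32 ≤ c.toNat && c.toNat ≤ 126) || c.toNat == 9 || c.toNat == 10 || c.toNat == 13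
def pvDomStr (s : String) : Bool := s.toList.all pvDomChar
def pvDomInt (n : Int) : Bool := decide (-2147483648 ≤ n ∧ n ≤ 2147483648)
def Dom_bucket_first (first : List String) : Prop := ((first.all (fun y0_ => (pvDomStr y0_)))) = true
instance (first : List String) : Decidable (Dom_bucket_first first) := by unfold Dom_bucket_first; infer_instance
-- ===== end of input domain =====

-- B replaces A's forward loop with an if/continue membership check by an unconditional
-- reverse-overwrite pass plus a re-emission of the keys in first-occurrence order; objective: alternative.

-- ===== PORT A =====
def bucket_first (first : List String) : List (String × Int) :=
  ((PySem.List.enumerate first 0).foldl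
    (fun C ic => if C.contains ic.2 then C else C.insert ic.2 ic.1)
    PySem.Dict.empty).items

-- ===== PORT B =====
-- Source B's idx[c] never raises KeyError: c ranges over dict.fromkeys(first), so c ∈ first and
-- idx holds every element of first; '(get? …).getD 0' is exact there (get? is some).
def bucket_first_alt (first : List String) : List (String × Int) :=
  let idx := (PySem.List.enumerate first 0).reverse.foldl
    (fun d ic => d.insert ic.2 ic.1) PySem.Dict.empty
  (PySem.List.dedup first).map (fun c => (c, (idx.get? c).getD 0))

-- ===== PRECONDITION & SPEC =====
def Spec_bucket_first (first : List String) (out : List (String × Int)) : Prop := out = bucket_first_alt first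
instance (first : List String) (out : List (String × Int)) : Decidable (Spec_bucket_first first out) := by unfold Spec_bucket_first; infer_instance

-- ===== CLAIM (what is proved, stated in full; the proofs are below) =====
def Claim_equal_bucket_first : Prop := ∀ (first : List String), Dom_bucket_first first → Spec_bucket_first first (bucket_first first)

-- ===== LEMMAS AND PROOFS =====

-- the common characterisation both programs are matched against:
-- distinct keys in first-occurrence order, each with its first index
def bucketSpec (first : List String) : List (String × Int) :=
  (PySem.List.dedup first).map
    (fun c => (c, (((PySem.List.index? first c).getD 0 : Nat) : Int)))

lemma dedup_append_singleton (xs : List String) (x : String) :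
    PySem.List.dedup (xs ++ [x]) =
      if x ∈ xs then PySem.List.dedup xs else PySem.List.dedup xs ++ [x] := by
  simp [PySem.List.dedup_eq_ofList, PySem.Set.ofList_eq_foldl, List.foldl_append,
        PySem.Set.add, PySem.Set.contains]
  simp [← PySem.Set.ofList_eq_foldl, PySem.Set.mem_ofList]

lemma spec_keys_any (xs : List String) (x : String) :
    (bucketSpec xs).any (fun p => p.1 == x) = decide (x ∈ xs) := by
  rw [Bool.eq_iff_iff]
  simp [bucketSpec, List.any_map, Function.comp_def, List.any_eq_true, PySem.Set.mem_ofList]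

-- B's reverse-overwrite dict maps c to its first index (offset by the enumerate start s)
lemma revIdx_get? (first : List String) (s : Int) (c : String) :
    ((PySem.List.enumerate first s).reverse.foldl
        (fun d ic => d.insert ic.2 ic.1) PySem.Dict.empty).get? c
      = (PySem.List.index? first c).map (fun k => s + (k : Int)) := by
  induction first generalizing s with
  | nil => rfl
  | cons x xs ih =>
    rw [PySem.List.enumerate_cons, List.reverse_cons, List.foldl_append]
    simp only [List.foldl_cons, List.foldl_nil]
    by_cases hcx : c = x
    · subst hcx
      rw [PySem.Dict.get?_insert_self, PySem.List.index?_cons_self]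
      simp
    · rw [PySem.Dict.get?_insert_of_ne _ _ hcx, ih (s + 1),
          PySem.List.index?_cons_of_ne xs (fun h => hcx h.symm)]
      cases h : PySem.List.index? xs c <;> simp
      ring

lemma alt_eq_spec (first : List String) :
    bucket_first_alt first = bucketSpec first := by
  unfold bucket_first_alt bucketSpec
  refine List.map_congr_left (fun c hc => ?_)
  have hmem : c ∈ first := (PySem.List.mem_dedup first c).1 hc
  obtain ⟨k, hk⟩ := Option.isSome_iff_exists.1 ((PySem.List.index?_isSome_iff first c).2 hmem)
  rw [revIdx_get? first 0 c, hk]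
  simp

lemma bucket_loop (first : List String) :
    (PySem.List.enumerate first 0).foldl
      (fun C ic => if C.contains ic.2 then C else C.insert ic.2 ic.1)
      PySem.Dict.empty
    = PySem.Dict.mk (bucketSpec first) := by
  induction first using List.reverseRecOn with
  | nil => rfl
  | append_singleton xs x ih =>
    rw [PySem.List.enumerate_append, List.foldl_append, ih]
    simp only [PySem.List.enumerate_cons, PySem.List.enumerate_nil, List.foldl_cons, List.foldl_nil]
    by_cases hx : x ∈ xs
    · have hc : (PySem.Dict.mk (bucketSpec xs)).contains x = true := by
        simp [PySem.Dict.contains, spec_keys_any, hx]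
      rw [if_pos hc]
      have : bucketSpec (xs ++ [x]) = bucketSpec xs := by
        unfold bucketSpec
        rw [dedup_append_singleton, if_pos hx]
        exact List.map_congr_left (fun c hc' => by
          rw [PySem.List.index?_append_of_mem _ ((PySem.List.mem_dedup xs c).1 hc')])
      rw [this]
    · have hc : (PySem.Dict.mk (bucketSpec xs)).contains x = false := by
        simp [PySem.Dict.contains, spec_keys_any, hx]
      rw [if_neg (by simp [hc]), PySem.Dict.insert, if_neg (by simp [hc])]
      unfold bucketSpec
      rw [dedup_append_singleton, if_neg hx, List.map_append]
      simp only [List.map_cons, List.map_nil]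
      have h1 : List.map (fun c => (c, (((PySem.List.index? (xs ++ [x]) c).getD 0 : Nat) : Int))) (PySem.List.dedup xs)
              = List.map (fun c => (c, (((PySem.List.index? xs c).getD 0 : Nat) : Int))) (PySem.List.dedup xs) :=
        List.map_congr_left (fun c hc' => by
          rw [PySem.List.index?_append_of_mem _ ((PySem.List.mem_dedup xs c).1 hc')])
      rw [h1, PySem.List.index?_append_singleton_self xs x hx]
      simp

-- ===== VERDICT (by name: the statement is the Claim_ definition above) =====
theorem bucket_first_spec : Claim_equal_bucket_first := by
  intro first _
  unfold Spec_bucket_first bucket_first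
  rw [bucket_loop, alt_eq_spec]
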